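-- pv_equiv track=rewrite | github.com/changmin0216/baekjoon | 프로그래머스/2/340211. ［PCCP 기출문제］ 3번 ／ 충돌위험 찾기/［PCCP 기출문제］ 3번 ／ 충돌위험 찾기.py | solution
-- ===== SOURCE A (Python) =====
-- from collections import Counter
--
-- def solution(points, routes):
--     def routing(route):
--         # 경로를 저장할 path, 시간을 기록할 time
--         path = []
--         time = 0
--
--         for i in range(len(route) - 1):
--             # 시작점 sx, sy, 도착점 ex, ey
--             sx, sy = points[route[i] - 1]
--             ex, ey = points[route[i + 1] - 1]
--
--             while sx != ex:
--                 path.append((sx, sy, time))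
--                 if sx > ex:
--                     sx -= 1
--                 else:
--                     sx += 1
--                 time += 1
--
--             while sy != ey:
--                 path.append((sx, sy, time))
--                 if sy > ey:
--                     sy -= 1
--                 else:
--                     sy += 1
--                 time += 1
--
--         path.append((sx, sy, time))
--         return path
--
--     robot_routes = []
--     for route in routes:
--         robot_routes.extend(routing(route))
--
--     answer = 0
--     counter = Counter(robot_routes)
--     for v in counter.values():
--         if v >= 2:
--             answer += 1
--
--     return answer
-- ===== SOURCE B (Python) =====
-- def solution(points, routes):
--     allp = []
--     for route in routes:
--         x, y = points[route[0] - 1]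
--         t = 0
--         for idx in route[1:]:
--             ex, ey = points[idx - 1]
--             sx = 1 if x <= ex else -1
--             allp.extend((x + k * sx, y, t + k) for k in range(abs(ex - x)))
--             t += abs(ex - x)
--             sy = 1 if y <= ey else -1
--             allp.extend((ex, y + k * sy, t + k) for k in range(abs(ey - y)))
--             t += abs(ey - y)
--             x, y = ex, ey
--         allp.append((x, y, t))
--     allp.sort()
--     answer = 0
--     i, n = 0, len(allp)
--     while i < n:
--         j = i + 1
--         while j < n and allp[j] == allp[i]:
--             j += 1
--         if j - i >= 2:
--             answer += 1
--         i = j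
--     return answer
-- ===== Notes on version B (the rewrite author's own statement) =====
-- stated objective: alternative
-- what changed: B replaces A's unit-step while-loop simulation and Counter build-then-rescan by generating each segment's (x,y,time) tuples arithmetically from ranges and counting duplicated tuples by sorting the combined list once and scanning adjacent runs.
import Mathlib
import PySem

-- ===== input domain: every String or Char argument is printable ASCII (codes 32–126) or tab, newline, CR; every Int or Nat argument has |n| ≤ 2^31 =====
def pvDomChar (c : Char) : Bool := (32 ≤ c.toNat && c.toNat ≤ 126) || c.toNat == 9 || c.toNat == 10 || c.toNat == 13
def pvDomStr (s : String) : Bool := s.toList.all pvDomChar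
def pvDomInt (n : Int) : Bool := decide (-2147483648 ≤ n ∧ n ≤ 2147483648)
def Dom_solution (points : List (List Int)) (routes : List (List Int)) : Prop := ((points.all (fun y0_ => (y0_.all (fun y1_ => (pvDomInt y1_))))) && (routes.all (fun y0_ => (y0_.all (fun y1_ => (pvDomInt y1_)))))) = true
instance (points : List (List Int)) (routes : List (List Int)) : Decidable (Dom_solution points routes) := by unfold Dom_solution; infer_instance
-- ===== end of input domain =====

-- B replaces A's step-by-step walk simulation and Counter rebuild-then-rescan by arithmetic range
-- generation of each segment's positions followed by sort-then-adjacent-run-scan duplicate counting;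
-- objective: alternative algorithm (return value only, no argument is mutated).

-- ===== PORT A =====

-- 'sx, sy = points[route[i] - 1]' : negative indices wrap (pyGet?); unpacking needs exactly two elements.
-- Outside Pre_solution (where Python raises IndexError/ValueError) the default (0, 0) is returned.
def pointAt (points : List (List Int)) (i : Int) : Int × Int :=
  match PySem.List.pyGet? points (i - 1) with
  | some [a, b] => (a, b)
  | _ => (0, 0)

-- 'while sx != ex: path.append((sx, sy, time)); sx ±= 1; time += 1' — structural on the loop's
-- exact trip count |ex - sx| (fuel only, for totality); the inner 'if' mirrors the while test.
def walkXAux : Nat → Int → Int → Int → Int → List (Int × Int × Int) × Int × Int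
  | 0, sx, _, _, time => ([], sx, time)
  | n + 1, sx, sy, ex, time =>
    if sx = ex then ([], sx, time)
    else
      let r := walkXAux n (if sx > ex then sx - 1 else sx + 1) sy ex (time + 1)
      ((sx, sy, time) :: r.1, r.2)

def walkX (sx sy ex time : Int) : List (Int × Int × Int) × Int × Int :=
  walkXAux (ex - sx).natAbs sx sy ex time

-- 'while sy != ey: …'
def walkYAux : Nat → Int → Int → Int → Int → List (Int × Int × Int) × Int × Int
  | 0, _, sy, _, time => ([], sy, time)
  | n + 1, sx, sy, ey, time =>
    if sy = ey then ([], sy, time)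
    else
      let r := walkYAux n sx (if sy > ey then sy - 1 else sy + 1) ey (time + 1)
      ((sx, sy, time) :: r.1, r.2)

def walkY (sx sy ey time : Int) : List (Int × Int × Int) × Int × Int :=
  walkYAux (ey - sy).natAbs sx sy ey time

-- 'for i in range(len(route) - 1)' over the consecutive pairs; state = (path so far, (sx, sy), time)
def segsA (points : List (List Int)) : List (Int × Int) → (Int × Int) → Int → List (Int × Int × Int) × (Int × Int) × Int
  | [], pos, time => ([], pos, time)
  | (a, b) :: ps, _, time =>
    let s := pointAt points a
    let e := pointAt points b
    let wx := walkX s.1 s.2 e.1 time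
    let wy := walkY wx.2.1 s.2 e.2 wx.2.2
    let rest := segsA points ps (wx.2.1, wy.2.1) wy.2.2
    (wx.1 ++ wy.1 ++ rest.1, rest.2)

-- def routing(route): … path.append((sx, sy, time)); return path
def routingA (points : List (List Int)) (route : List Int) : List (Int × Int × Int) :=
  let r := segsA points (route.zip route.tail) (0, 0) 0
  r.1 ++ [(r.2.1.1, r.2.1.2, r.2.2)]

def solution (points : List (List Int)) (routes : List (List Int)) : Int :=
  let robot_routes := routes.foldl (fun acc route => acc ++ routingA points route) []
  let counter := PySem.Dict.counter robot_routes
  counter.values.foldl (fun a v => if v ≥ 2 then a + 1 else a) 0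

-- ===== PORT B =====

-- '(x + k * sx, y, t + k) for k in range(abs(ex - x))' with sx = 1 if x <= ex else -1
def segX (x y t ex : Int) : List (Int × Int × Int) :=
  let sx : Int := if x ≤ ex then 1 else -1
  (PySem.List.pyRange 0 ((ex - x).natAbs : Int)).map (fun k => (x + k * sx, y, t + k))

-- '(ex, y + k * sy, t + k) for k in range(abs(ey - y))' with sy = 1 if y <= ey else -1
def segY (ex y t ey : Int) : List (Int × Int × Int) :=
  let sy : Int := if y ≤ ey then 1 else -1
  (PySem.List.pyRange 0 ((ey - y).natAbs : Int)).map (fun k => (ex, y + k * sy, t + k))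

-- 'for idx in route[1:]: …' — emits both segments, advances (x, y, t); final append at the end
def goB (points : List (List Int)) : List Int → Int → Int → Int → List (Int × Int × Int)
  | [], x, y, t => [(x, y, t)]
  | r :: rs, x, y, t =>
    let e := pointAt points r
    segX x y t e.1 ++ segY e.1 y (t + ((e.1 - x).natAbs : Int)) e.2 ++
      goB points rs e.1 e.2 (t + ((e.1 - x).natAbs : Int) + ((e.2 - y).natAbs : Int))

-- one robot's tuples ([] is outside Pre_solution: Python raises there)
def routingB (points : List (List Int)) (route : List Int) : List (Int × Int × Int) :=
  match route with
  | [] => []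
  | r :: rs => goB points rs (pointAt points r).1 (pointAt points r).2 0

-- Python's tuple '<' on int triples, lexicographic
def lexLT (a b : Int × Int × Int) : Bool :=
  a.1 < b.1 || (a.1 == b.1 && (a.2.1 < b.2.1 || (a.2.1 == b.2.1 && a.2.2 < b.2.2)))

-- 'allp.sort()' — stable insertion sort with Python's lexicographic tuple order, exact
-- (hand port: PySem.List.sorted needs an LT key; triples are compared component-wise here)
def sortLex (xs : List (Int × Int × Int)) : List (Int × Int × Int) :=
  xs.foldl (fun acc v => PySem.List.insertBy lexLT v acc) []

-- the index scan 'while i < n: j = i + 1; while j < n and allp[j] == allp[i]: j += 1; …; i = j'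
-- transcribed structurally: the run at i is the head plus the equal prefix of the tail,
-- j - i = (run length) = xs.length - rest.length + 1, and i = j restarts on rest
def runScan : List (Int × Int × Int) → Int
  | [] => 0
  | a :: xs =>
    (if 2 ≤ xs.length - (xs.dropWhile (· == a)).length + 1 then 1 else 0) +
      runScan (xs.dropWhile (· == a))
termination_by l => l.length
decreasing_by simpa using Nat.lt_succ_of_le (List.length_dropWhile_le _ _)

def solution_alt (points : List (List Int)) (routes : List (List Int)) : Int :=
  let allp := routes.foldl (fun acc route => acc ++ routingB points route) []
  runScan (sortLex allp)

-- ===== PRECONDITION & SPEC =====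
-- Exactly the inputs on which Python A returns: every route has ≥ 2 stops (a shorter route leaves 'sx'
-- unbound → NameError) and every stop q indexes an existing point (wraparound included) of exactly 2
-- coordinates (else IndexError / unpacking ValueError).
def Pre_solution (points : List (List Int)) (routes : List (List Int)) : Prop :=
  ∀ r ∈ routes, 2 ≤ r.length ∧ ∀ q ∈ r, (PySem.List.pyGet? points (q - 1)).map List.length = some 2
instance (points : List (List Int)) (routes : List (List Int)) : Decidable (Pre_solution points routes) := by
  unfold Pre_solution; infer_instance

def pvWitness_solution : List (List Int) × List (List Int) := ([[0, 0], [0, 2]], [[1, 2], [2, 1]])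

def Spec_solution (points : List (List Int)) (routes : List (List Int)) (out : Int) : Prop := out = solution_alt points routes
instance (points : List (List Int)) (routes : List (List Int)) (out : Int) : Decidable (Spec_solution points routes out) := by unfold Spec_solution; infer_instance

-- ===== CLAIM (what is proved, stated in full; the proofs are below) =====
def Claim_equal_solution : Prop := ∀ (points : List (List Int)) (routes : List (List Int)), Dom_solution points routes → Pre_solution points routes → Spec_solution points routes (solution points routes)

-- ===== LEMMAS AND PROOFS =====

-- number of distinct tuples occurring at least twice in p (A counts it via Counter, B via sort+scan)
def ng (p : List (Int × Int × Int)) : Nat :=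
  (PySem.Set.ofList p).countP (fun k => decide (2 ≤ p.count k))

-- A's final loop over Counter(p).values counts exactly ng p
theorem a_count (p : List (Int × Int × Int)) :
    (PySem.Dict.counter p).values.foldl (fun a v => if v ≥ 2 then a + 1 else a) 0 = (ng p : Int) := by
  have hv : (PySem.Dict.counter p).values
      = (PySem.Set.ofList p).map (fun k => (p.count k : Int)) := by
    have h0 : (PySem.Dict.counter p).values = (PySem.Dict.counter p).items.map (fun x => x.2) := rfl
    rw [h0, PySem.Dict.items_counter, List.map_map]
    rfl
  rw [hv, PySem.List.foldl_ite_add_one, List.countP_map, zero_add]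
  unfold ng
  congr 1
  refine List.countP_congr (fun x _ => ?_)
  simp only [Function.comp, decide_eq_true_eq]
  constructor <;> (intro hx) <;> exact_mod_cast hx

-- 'segX x y t ex' as a plain map over List.range
theorem segX_eq_range (x y t ex : Int) :
    segX x y t ex = (List.range (ex - x).natAbs).map
      (fun k : Nat => (x + (k : Int) * (if x ≤ ex then 1 else -1), y, t + (k : Int))) := by
  unfold segX
  rw [PySem.List.pyRange_zero_natCast, List.map_map]
  rfl

theorem segY_eq_range (ex y t ey : Int) :
    segY ex y t ey = (List.range (ey - y).natAbs).map
      (fun k : Nat => (ex, y + (k : Int) * (if y ≤ ey then 1 else -1), t + (k : Int))) := by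
  unfold segY
  rw [PySem.List.pyRange_zero_natCast, List.map_map]
  rfl

-- A's x-walk IS B's arithmetic range (same tuples in the same order), and ends at (ex, time + |ex-sx|)
theorem walkXAux_eq (ex sy : Int) : ∀ (n : Nat) (sx time : Int), n = (ex - sx).natAbs →
    walkXAux n sx sy ex time = (segX sx sy time ex, ex, time + (n : Int)) := by
  intro n
  induction n with
  | zero =>
    intro sx time h
    have hx : sx = ex := by omega
    subst hx
    simp [walkXAux, segX_eq_range]
  | succ n ih =>
    intro sx time h
    have hne : sx ≠ ex := by omega
    rw [walkXAux, if_neg hne]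
    have hnext : n = (ex - (if sx > ex then sx - 1 else sx + 1)).natAbs := by
      split <;> omega
    rw [ih _ (time + 1) hnext]
    rw [segX_eq_range, segX_eq_range, ← hnext, ← h, List.range_succ_eq_map, List.map_cons,
      List.map_map]
    refine Prod.ext ?_ (Prod.ext rfl (by push_cast; ring))
    show (sx, sy, time) :: _ = _ :: _
    congr 1
    · simp
    · refine List.map_congr_left (fun k hk => ?_)
      have hkn : k < n := List.mem_range.mp hk
      by_cases hx : sx ≤ ex
      · have hx1 : ¬ sx > ex := by omega
        have hx2 : sx + 1 ≤ ex := by omega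
        simp only [hx1, if_false, if_pos hx, if_pos hx2, Function.comp_apply, Prod.mk.injEq]
        push_cast
        exact ⟨by ring, trivial, by ring⟩
      · have hx1 : sx > ex := by omega
        have hx2 : ¬ sx - 1 ≤ ex := by omega
        simp only [if_pos hx1, if_neg hx, if_neg hx2, Function.comp_apply, Prod.mk.injEq]
        push_cast
        exact ⟨by ring, trivial, by ring⟩

theorem walkYAux_eq (ey sx : Int) : ∀ (n : Nat) (sy time : Int), n = (ey - sy).natAbs →
    walkYAux n sx sy ey time = (segY sx sy time ey, ey, time + (n : Int)) := by
  intro n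
  induction n with
  | zero =>
    intro sy time h
    have hy : sy = ey := by omega
    subst hy
    simp [walkYAux, segY_eq_range]
  | succ n ih =>
    intro sy time h
    have hne : sy ≠ ey := by omega
    rw [walkYAux, if_neg hne]
    have hnext : n = (ey - (if sy > ey then sy - 1 else sy + 1)).natAbs := by
      split <;> omega
    rw [ih _ (time + 1) hnext]
    rw [segY_eq_range, segY_eq_range, ← hnext, ← h, List.range_succ_eq_map, List.map_cons,
      List.map_map]
    refine Prod.ext ?_ (Prod.ext rfl (by push_cast; ring))
    show (sx, sy, time) :: _ = _ :: _
    congr 1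
    · simp
    · refine List.map_congr_left (fun k hk => ?_)
      have hkn : k < n := List.mem_range.mp hk
      by_cases hy : sy ≤ ey
      · have hy1 : ¬ sy > ey := by omega
        have hy2 : sy + 1 ≤ ey := by omega
        simp only [hy1, if_false, if_pos hy, if_pos hy2, Function.comp_apply, Prod.mk.injEq]
        push_cast
        exact ⟨trivial, by ring, by ring⟩
      · have hy1 : sy > ey := by omega
        have hy2 : ¬ sy - 1 ≤ ey := by omega
        simp only [if_pos hy1, if_neg hy, if_neg hy2, Function.comp_apply, Prod.mk.injEq]
        push_cast
        exact ⟨trivial, by ring, by ring⟩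

theorem walkX_eq (sx sy ex time : Int) :
    walkX sx sy ex time = (segX sx sy time ex, ex, time + (((ex - sx).natAbs : Nat) : Int)) :=
  walkXAux_eq ex sy _ sx time rfl

theorem walkY_eq (sx sy ey time : Int) :
    walkY sx sy ey time = (segY sx sy time ey, ey, time + (((ey - sy).natAbs : Nat) : Int)) :=
  walkYAux_eq ey sx _ sy time rfl

-- B's per-robot generator = A's routing (from the second stop on)
theorem goB_eq (points : List (List Int)) (rs : List Int) : ∀ (r : Int) (t : Int),
    goB points rs (pointAt points r).1 (pointAt points r).2 t =
      (segsA points ((r :: rs).zip rs) (pointAt points r) t).1 ++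
        [((segsA points ((r :: rs).zip rs) (pointAt points r) t).2.1.1,
          (segsA points ((r :: rs).zip rs) (pointAt points r) t).2.1.2,
          (segsA points ((r :: rs).zip rs) (pointAt points r) t).2.2)] := by
  induction rs with
  | nil => intro r t; simp [goB, segsA]
  | cons r' rs ih =>
    intro r t
    simp only [List.zip_cons_cons, segsA, goB]
    rw [walkX_eq, walkY_eq, ih r']
    simp [List.append_assoc]

theorem routingB_eq (points : List (List Int)) (route : List Int) (h : 2 ≤ route.length) :
    routingB points route = routingA points route := by
  match route, h with
  | r :: r' :: rs, _ =>
    have hpos : segsA points ((r :: r' :: rs).zip (r' :: rs)) (0, 0) 0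
        = segsA points ((r :: r' :: rs).zip (r' :: rs)) (pointAt points r) 0 := rfl
    simp only [routingB, routingA, List.tail_cons]
    rw [hpos, ← goB_eq points (r' :: rs) r 0]

-- every route of length ≥ 2 generates the same tuples under both generators
theorem flatMapB_eq (points : List (List Int)) (routes : List (List Int))
    (h : ∀ r ∈ routes, 2 ≤ r.length) :
    routes.flatMap (routingB points) = routes.flatMap (routingA points) := by
  induction routes with
  | nil => rfl
  | cons r rest ih =>
    rw [List.flatMap_cons, List.flatMap_cons, routingB_eq points r (h r List.mem_cons_self),
      ih (fun r' hr' => h r' (List.mem_cons_of_mem r hr'))]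

-- ng is invariant under rearrangement
theorem ng_perm {p q : List (Int × Int × Int)} (h : p.Perm q) : ng p = ng q := by
  unfold ng
  have hperm : (PySem.Set.ofList p).Perm (PySem.Set.ofList q) := by
    refine (List.perm_ext_iff_of_nodup (PySem.Set.nodup_ofList p) (PySem.Set.nodup_ofList q)).mpr ?_
    intro a
    rw [PySem.Set.mem_ofList, PySem.Set.mem_ofList]
    exact h.mem_iff
  have hc : (fun k => decide (2 ≤ p.count k)) = (fun k => decide (2 ≤ q.count k)) := by
    funext k; rw [h.count_eq]
  rw [hc, hperm.countP_eq]

-- lexLT is a strict linear order on triples (antisymmetric, asymmetric, "transitive across ≤")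
theorem lexLT_antisymm (a b : Int × Int × Int) (h1 : lexLT a b = false) (h2 : lexLT b a = false) :
    a = b := by
  obtain ⟨a1, a2, a3⟩ := a; obtain ⟨b1, b2, b3⟩ := b
  simp only [lexLT, Bool.or_eq_false_iff, Bool.and_eq_false_iff, decide_eq_false_iff_not,
    not_lt, beq_eq_false_iff_ne, ne_eq, Prod.mk.injEq] at *
  constructor
  · omega
  constructor <;> omega

theorem lexLT_asymm (a b : Int × Int × Int) (h : lexLT a b = true) : lexLT b a = false := by
  obtain ⟨a1, a2, a3⟩ := a; obtain ⟨b1, b2, b3⟩ := b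
  simp only [lexLT, Bool.or_eq_true, Bool.and_eq_true, decide_eq_true_eq, beq_iff_eq,
    Bool.or_eq_false_iff, Bool.and_eq_false_iff, decide_eq_false_iff_not, not_lt,
    beq_eq_false_iff_ne, ne_eq] at *
  omega

theorem lexLT_cross (u y z : Int × Int × Int) (h1 : lexLT u y = true) (h2 : lexLT z y = false) :
    lexLT z u = false := by
  obtain ⟨a1, a2, a3⟩ := u; obtain ⟨b1, b2, b3⟩ := y; obtain ⟨c1, c2, c3⟩ := z
  simp only [lexLT, Bool.or_eq_true, Bool.and_eq_true, decide_eq_true_eq, beq_iff_eq,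
    Bool.or_eq_false_iff, Bool.and_eq_false_iff, decide_eq_false_iff_not, not_lt,
    beq_eq_false_iff_ne, ne_eq] at *
  omega

theorem insertBy_perm (v : Int × Int × Int) (ys : List (Int × Int × Int)) :
    (PySem.List.insertBy lexLT v ys).Perm (v :: ys) := by
  induction ys with
  | nil => simp [PySem.List.insertBy]
  | cons y ys ih =>
    simp only [PySem.List.insertBy]
    split
    · exact List.Perm.refl _
    · exact (ih.cons y).trans (List.Perm.swap v y ys)

theorem insertBy_pairwise (v : Int × Int × Int) (ys : List (Int × Int × Int))
    (h : ys.Pairwise (fun a b => lexLT b a = false)) :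
    (PySem.List.insertBy lexLT v ys).Pairwise (fun a b => lexLT b a = false) := by
  induction ys with
  | nil => simp [PySem.List.insertBy]
  | cons y ys ih =>
    rw [List.pairwise_cons] at h
    simp only [PySem.List.insertBy]
    split
    · rename_i hlt
      refine List.pairwise_cons.mpr ⟨?_, List.pairwise_cons.mpr ⟨h.1, h.2⟩⟩
      intro b hb
      rcases List.mem_cons.mp hb with rfl | hb
      · exact lexLT_asymm v b hlt
      · exact lexLT_cross v y b hlt (h.1 b hb)
    · rename_i hnlt
      refine List.pairwise_cons.mpr ⟨?_, ih h.2⟩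
      intro b hb
      rcases List.mem_cons.mp ((insertBy_perm v ys).mem_iff.mp hb) with hbv | hb2
      · subst hbv; simpa using hnlt
      · exact h.1 b hb2

-- the insertion-sort fold both permutes and orders
theorem sortLex_aux (xs : List (Int × Int × Int)) : ∀ acc,
    (xs.foldl (fun acc v => PySem.List.insertBy lexLT v acc) acc).Perm (acc ++ xs) ∧
    ((acc.Pairwise (fun a b => lexLT b a = false)) →
      (xs.foldl (fun acc v => PySem.List.insertBy lexLT v acc) acc).Pairwise
        (fun a b => lexLT b a = false)) := by
  induction xs with
  | nil => exact fun acc => ⟨by simp, fun h => h⟩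
  | cons x xs ih =>
    intro acc
    refine ⟨?_, fun hacc => (ih _).2 (insertBy_pairwise x acc hacc)⟩
    have h1 := (ih (PySem.List.insertBy lexLT x acc)).1
    have h2 := (insertBy_perm x acc).append_right xs
    exact (h1.trans h2).trans (by simpa using List.perm_middle.symm)

theorem sortLex_perm (xs : List (Int × Int × Int)) : (sortLex xs).Perm xs := by
  simpa using (sortLex_aux xs []).1

theorem sortLex_pairwise (xs : List (Int × Int × Int)) :
    (sortLex xs).Pairwise (fun a b => lexLT b a = false) :=
  (sortLex_aux xs []).2 List.Pairwise.nil

theorem discard_of_not_mem {a : Int × Int × Int} {s : List (Int × Int × Int)} (h : a ∉ s) :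
    PySem.Set.discard s a = s := by
  refine List.filter_eq_self.mpr (fun b hb => ?_)
  have : b ≠ a := fun hba => h (hba ▸ hb)
  simpa using this

-- set(a :: run ++ rest) = a :: set(rest) when the run is all a's and a is not in rest
theorem ofList_cons_run (a : Int × Int × Int) (rest : List (Int × Int × Int)) (ha : a ∉ rest) :
    ∀ run : List (Int × Int × Int), (∀ b ∈ run, b = a) →
      PySem.Set.ofList (a :: (run ++ rest)) = a :: PySem.Set.ofList rest := by
  intro run
  induction run with
  | nil =>
    intro _
    rw [List.nil_append, PySem.Set.ofList_cons,
      discard_of_not_mem (fun hm => ha ((PySem.Set.mem_ofList rest a).mp hm))]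
  | cons b run ih =>
    intro hall
    have hb : b = a := hall b List.mem_cons_self
    subst hb
    rw [List.cons_append, PySem.Set.ofList_cons,
      ih (fun c hc => hall c (List.mem_cons_of_mem b hc))]
    have h1 : PySem.Set.discard (b :: PySem.Set.ofList rest) b
        = PySem.Set.discard (PySem.Set.ofList rest) b := by
      simp [PySem.Set.discard]
    rw [h1, discard_of_not_mem (fun hm => ha ((PySem.Set.mem_ofList rest b).mp hm))]

theorem dropWhile_cons_head_false {α : Type} (p : α → Bool) :
    ∀ (l : List α) {hd : α} {tl : List α}, l.dropWhile p = hd :: tl → p hd = false := by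
  intro l
  induction l with
  | nil => intro hd tl h; cases h
  | cons c l ih =>
    intro hd tl h
    rw [List.dropWhile_cons] at h
    by_cases hc : p c = true
    · rw [if_pos hc] at h; exact ih h
    · rw [if_neg hc] at h
      injection h with h1 _
      subst h1
      simpa using hc

-- on a sorted list the adjacent-run scan counts exactly the tuples with multiplicity ≥ 2
theorem runScan_eq_ng_aux : ∀ (n : Nat) (l : List (Int × Int × Int)), l.length ≤ n →
    l.Pairwise (fun a b => lexLT b a = false) → runScan l = (ng l : Int) := by
  intro n
  induction n with
  | zero =>
    intro l hl _
    have : l = [] := List.eq_nil_of_length_eq_zero (Nat.le_zero.mp hl)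
    subst this
    simp [runScan, ng]
  | succ n ih =>
    intro l hl hpw
    match l with
    | [] => simp [runScan, ng]
    | a :: xs =>
      rw [List.pairwise_cons] at hpw
      set run := xs.takeWhile (· == a) with hrun
      set rest := xs.dropWhile (· == a) with hrest
      have hsplit : run ++ rest = xs := List.takeWhile_append_dropWhile
      have hruna : ∀ b ∈ run, b = a := fun b hb => by
        simpa using List.mem_takeWhile_imp hb
      have hpwrest : rest.Pairwise (fun a b => lexLT b a = false) :=
        hpw.2.sublist (List.dropWhile_sublist _)
      have harest : a ∉ rest := by
        intro hmem
        rcases hr : rest with _ | ⟨hd, tl⟩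
        · rw [hr] at hmem; exact absurd hmem (List.not_mem_nil)
        · have hdw : xs.dropWhile (· == a) = hd :: tl := by rw [← hrest, hr]
          have hhd : (hd == a) = false := dropWhile_cons_head_false (· == a) xs hdw
          have hhdne : hd ≠ a := by simpa using hhd
          have hhdxs : hd ∈ xs :=
            (List.dropWhile_sublist _).mem (by rw [hdw]; exact List.mem_cons_self)
          have h1 : lexLT hd a = false := hpw.1 _ hhdxs
          rw [hr] at hmem
          rcases List.mem_cons.mp hmem with h2 | h2
          · exact hhdne h2.symm
          · have hpw2 := List.pairwise_cons.mp (hr ▸ hpwrest)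
            have h3 : lexLT a hd = false := hpw2.1 a h2
            exact hhdne (lexLT_antisymm hd a h1 h3)
      have hcrun : run.count a = run.length :=
        List.count_eq_length.mpr (fun b hb => (hruna b hb).symm)
      have hcresta : rest.count a = 0 := List.count_eq_zero.mpr harest
      have hca : (a :: xs).count a = run.length + 1 := by
        rw [← hsplit]
        simp [List.count_append, hcrun, hcresta]
      have hcne : ∀ c, c ≠ a → (a :: xs).count c = rest.count c := by
        intro c hc
        rw [← hsplit]
        have hcr : run.count c = 0 := List.count_eq_zero.mpr (fun hm => hc (hruna c hm))
        have hac : ¬ a = c := fun h => hc h.symm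
        simp [List.count_append, hcr, hac]
      have hofl : PySem.Set.ofList (a :: xs) = a :: PySem.Set.ofList rest := by
        rw [← hsplit]; exact ofList_cons_run a rest harest run hruna
      have hlen : xs.length = run.length + rest.length := by
        rw [← hsplit, List.length_append]
      have hng : ng (a :: xs) = ng rest + (if 1 ≤ run.length then 1 else 0) := by
        unfold ng
        rw [hofl, List.countP_cons]
        congr 1
        · refine List.countP_congr (fun k hk => ?_)
          have hkr : k ∈ rest := (PySem.Set.mem_ofList rest k).mp hk
          have hkne : k ≠ a := fun hka => harest (hka ▸ hkr)
          rw [hcne k hkne]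
        · rw [hca]
          by_cases h1 : 1 ≤ run.length
          · have h2 : 2 ≤ run.length + 1 := by omega
            simp [h1, h2]
          · have h0 : run.length = 0 := by omega
            simp [h0]
      have hlrest : rest.length ≤ n := by
        simp only [List.length_cons] at hl
        omega
      rw [runScan, ih rest hlrest hpwrest, hng]
      have hcond : (2 ≤ xs.length - rest.length + 1) ↔ (1 ≤ run.length) := by omega
      by_cases hc : 1 ≤ run.length
      · rw [if_pos (hcond.mpr hc), if_pos hc]; push_cast; ring
      · rw [if_neg (fun h => hc (hcond.mp h)), if_neg hc]; push_cast; ring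

theorem runScan_eq_ng (l : List (Int × Int × Int))
    (h : l.Pairwise (fun a b => lexLT b a = false)) : runScan l = (ng l : Int) :=
  runScan_eq_ng_aux l.length l (Nat.le_refl _) h

-- ===== VERDICT (by name: the statement is the Claim_ definition above) =====
theorem solution_spec : Claim_equal_solution := by
  intro points routes _ hpre
  unfold Spec_solution solution solution_alt
  have hA : routes.foldl (fun acc route => acc ++ routingA points route) []
      = routes.flatMap (routingA points) := by
    rw [PySem.List.foldl_append_eq_flatMap, List.nil_append]
  have hB : routes.foldl (fun acc route => acc ++ routingB points route) []
      = routes.flatMap (routingB points) := by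
    rw [PySem.List.foldl_append_eq_flatMap, List.nil_append]
  have hBA : routes.flatMap (routingB points) = routes.flatMap (routingA points) :=
    flatMapB_eq points routes (fun r hr => (hpre r hr).1)
  rw [hA, hB, hBA, a_count,
    runScan_eq_ng _ (sortLex_pairwise _),
    ng_perm (sortLex_perm (routes.flatMap (routingA points)))]
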